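-- pv_equiv track=rewrite | github.com/FreddyMachaca/INF-111 | PRACTICA PRIMER PARCIAL/Ejercicio11/Python/SecuenciaInterpolada.py | generar_secuencia
-- ===== SOURCE A (Python) =====
-- def generar_secuencia(n):
--     secuencia = []
--     count = 0
--     value = 0
--
--     for i in range(n):
--         secuencia.append(value)
--         count += 1
--
--         if count == value + 1:
--             value = 1 - value
--             count = 0
--
--     return secuencia
-- ===== SOURCE B (Python) =====
-- def generar_secuencia(n):
--     return [0 if i % 3 == 0 else 1 for i in range(n)]
-- ===== Notes on version B (the rewrite author's own statement) =====
-- stated objective: simpler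
-- what changed: Replaced the count/value state machine with a stateless closed form: element i is 0 iff i % 3 == 0, computed directly per index in one comprehension.
import Mathlib
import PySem

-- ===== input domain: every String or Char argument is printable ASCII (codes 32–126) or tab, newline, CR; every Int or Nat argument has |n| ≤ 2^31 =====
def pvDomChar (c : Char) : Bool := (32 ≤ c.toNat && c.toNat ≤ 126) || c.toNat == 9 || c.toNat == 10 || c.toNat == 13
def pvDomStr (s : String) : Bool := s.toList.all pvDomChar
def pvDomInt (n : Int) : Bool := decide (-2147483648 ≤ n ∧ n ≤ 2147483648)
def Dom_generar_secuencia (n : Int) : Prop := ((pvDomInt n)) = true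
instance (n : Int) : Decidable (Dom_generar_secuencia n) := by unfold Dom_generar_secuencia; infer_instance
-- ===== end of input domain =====

-- B replaces A's count/value state machine by the stateless closed form 'i % 3 == 0 → 0 else 1' (simpler, same cost).

-- ===== PORT A =====
-- loop body of A: state is (secuencia, count, value)
def pvStepA (s : List Int × Int × Int) (_i : Int) : List Int × Int × Int :=
  let sec := s.1 ++ [s.2.2]
  let count := s.2.1 + 1
  if count = s.2.2 + 1 then (sec, 0, 1 - s.2.2) else (sec, count, s.2.2)

def generar_secuencia (n : Int) : List Int :=
  ((PySem.List.pyRange 0 n 1).foldl pvStepA ([], 0, 0)).1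

-- ===== PORT B =====
def generar_secuencia_alt (n : Int) : List Int :=
  (PySem.List.pyRange 0 n 1).map (fun i => if PySem.Int.mod i 3 = 0 then 0 else 1)

-- ===== PRECONDITION & SPEC =====
def Spec_generar_secuencia (n : Int) (out : List Int) : Prop := out = generar_secuencia_alt n
instance (n : Int) (out : List Int) : Decidable (Spec_generar_secuencia n out) := by unfold Spec_generar_secuencia; infer_instance

-- ===== CLAIM (what is proved, stated in full; the proofs are below) =====
def Claim_equal_generar_secuencia : Prop := ∀ (n : Int), Dom_generar_secuencia n → Spec_generar_secuencia n (generar_secuencia n)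

-- ===== LEMMAS AND PROOFS =====

-- the (count, value) pair A's loop holds before processing index m
def pvStateA (m : Nat) : Int × Int :=
  if m % 3 = 0 then (0, 0) else if m % 3 = 1 then (0, 1) else (1, 1)

lemma pvMod3 (m : Nat) : PySem.Int.mod (m : Int) 3 = ((m % 3 : Nat) : Int) := by
  simp only [PySem.Int.mod, Int.fmod_eq_emod]
  omega

lemma pvLoopA (m : Nat) :
    (PySem.List.pyRange 0 (m : Int) 1).foldl pvStepA (([] : List Int), 0, 0)
      = ((PySem.List.pyRange 0 (m : Int) 1).map
           (fun i => if PySem.Int.mod i 3 = 0 then 0 else 1),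
         pvStateA m) := by
  induction m with
  | zero => simp [pvStateA]
  | succ m ih =>
    have h : ((m : Int) + 1) = ((m + 1 : Nat) : Int) := by push_cast; ring
    rw [← h, PySem.List.pyRange_one_succ_right (by positivity),
        List.foldl_append, List.map_append, ih]
    simp only [List.foldl_cons, List.foldl_nil, List.map_cons, List.map_nil, pvMod3]
    by_cases h0 : m % 3 = 0
    · have h1 : (m + 1) % 3 = 1 := by omega
      simp [pvStateA, pvStepA, h0, h1]
    · by_cases h1 : m % 3 = 1
      · have h2 : (m + 1) % 3 = 2 := by omega
        simp [pvStateA, pvStepA, h1, h2]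
      · have h2 : m % 3 = 2 := by omega
        have h3 : (m + 1) % 3 = 0 := by omega
        simp [pvStateA, pvStepA, h2, h3]

-- ===== VERDICT (by name: the statement is the Claim_ definition above) =====
theorem generar_secuencia_spec : Claim_equal_generar_secuencia := by
  intro n _
  unfold Spec_generar_secuencia generar_secuencia generar_secuencia_alt
  by_cases hn : n ≤ 0
  · rw [PySem.List.pyRange_one_eq_nil hn]
    simp
  · have h : n = ((n.toNat : Nat) : Int) := by omega
    rw [h, pvLoopA]
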